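-- pv_equiv track=rewrite | github.com/BrianLusina/PythonSnips | algorithms/greedy/minimum_number_of_pushes/__init__.py | minimum_pushes_heap
-- ===== SOURCE A (Python) =====
-- from collections import Counter
-- import heapq
--
-- def minimum_pushes_heap(word: str) -> int:
--     # frequency_map to store the count of each letter
--     frequency_map = Counter(word)
--
--     # Priority queue/max heap to store frequencies in descending order
--     frequency_queue = [-freq for freq in frequency_map.values()]
--     heapq.heapify(frequency_queue)
--
--     # total number of key presses required
--     total_pushes = 0
--     index = 0
--
--     # iterate through the sorted frequency_map
--     while frequency_queue:
--         total_pushes += (1 + (index // 8)) * -heapq.heappop(frequency_queue)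
--         index += 1
--
--     return total_pushes
-- ===== SOURCE B (Python) =====
-- from collections import Counter
--
-- def minimum_pushes_heap(word: str) -> int:
--     # sort the letter frequencies descending once, then one weighted pass
--     freqs = sorted(Counter(word).values(), reverse=True)
--     return sum((1 + i // 8) * f for i, f in enumerate(freqs))
-- ===== Notes on version B (the rewrite author's own statement) =====
-- stated objective: simpler
-- what changed: Replaces the negated max-heap with repeated heappop and manually tracked index/total by a single descending sort of the frequency values followed by one enumerated weighted-sum pass.
import Mathlib
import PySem

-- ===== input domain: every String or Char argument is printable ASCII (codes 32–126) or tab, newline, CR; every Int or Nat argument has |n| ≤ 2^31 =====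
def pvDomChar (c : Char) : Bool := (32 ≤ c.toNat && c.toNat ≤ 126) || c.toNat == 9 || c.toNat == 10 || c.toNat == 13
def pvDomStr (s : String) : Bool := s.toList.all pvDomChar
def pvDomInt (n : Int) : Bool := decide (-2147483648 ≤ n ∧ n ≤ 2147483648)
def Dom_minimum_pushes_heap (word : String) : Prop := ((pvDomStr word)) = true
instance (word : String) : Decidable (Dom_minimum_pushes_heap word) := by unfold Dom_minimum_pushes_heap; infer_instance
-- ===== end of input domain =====

-- B replaces A's negated max-heap + repeated heappop loop by one descending sort
-- of the frequency values followed by a single enumerated weighted-sum pass (simpler).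


-- ===== PORT A =====
-- heapq model: a heap of Ints is its list of elements; heappop returns the minimum
-- and the remaining elements (Python's heappop pops the min; for Int elements the
-- popped value and the remaining multiset determine all observable behaviour).
def pyHeapPop? (h : List Int) : Option (Int × List Int) :=
  match PySem.List.min? h (fun x => x) with
  | none => none
  | some m => some (m, (PySem.List.remove? h m).getD [])

-- the 'while frequency_queue:' loop; fuel = initial queue length (one element leaves per pop)
def heapLoopFuel : Nat → List Int → Int → Int → Int
  | 0, _, total, _ => total
  | n + 1, q, total, index =>
    match pyHeapPop? q with
    | none => total
    | some (m, rest) =>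
        heapLoopFuel n rest (total + (1 + PySem.Int.floordiv index 8) * (-m)) (index + 1)

def minimum_pushes_heap (word : String) : Int :=
  let frequency_map := PySem.Dict.counter word.toList
  let frequency_queue := frequency_map.values.map (fun freq => -freq)
  heapLoopFuel frequency_queue.length frequency_queue 0 0

-- ===== PORT B =====
def minimum_pushes_heap_alt (word : String) : Int :=
  let freqs := PySem.List.sorted (PySem.Dict.counter word.toList).values (fun x => x) true
  (PySem.List.enumerate freqs 0).foldl
    (fun acc p => acc + (1 + PySem.Int.floordiv p.1 8) * p.2) 0

-- ===== PRECONDITION & SPEC =====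
def Spec_minimum_pushes_heap (word : String) (out : Int) : Prop := out = minimum_pushes_heap_alt word
instance (word : String) (out : Int) : Decidable (Spec_minimum_pushes_heap word out) := by unfold Spec_minimum_pushes_heap; infer_instance

-- ===== CLAIM (what is proved, stated in full; the proofs are below) =====
def Claim_equal_minimum_pushes_heap : Prop := ∀ (word : String), Dom_minimum_pushes_heap word → Spec_minimum_pushes_heap word (minimum_pushes_heap word)

-- ===== LEMMAS AND PROOFS =====

-- weighted sum of a pop sequence, shared reference shape for both ports
def wsum : List Int → Int → Int → Int
  | [], total, _ => total
  | m :: rest, total, index =>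
      wsum rest (total + (1 + PySem.Int.floordiv index 8) * (-m)) (index + 1)

-- popping the min of q puts it at the head of sorted q
theorem sorted_cons_erase (q : List Int) (m : Int)
    (hmem : m ∈ q) (hmin : ∀ y ∈ q, m ≤ y) :
    PySem.List.sorted q (fun x => x) false = m :: PySem.List.sorted (q.erase m) (fun x => x) false := by
  apply PySem.List.sorted_id_eq_of_perm_of_pairwise
  · exact ((PySem.List.sorted_perm _ _ _).cons m).trans (List.perm_cons_erase hmem).symm
  · refine List.pairwise_cons.mpr ⟨?_, ?_⟩
    · intro y hy
      exact hmin y (List.mem_of_mem_erase ((PySem.List.mem_sorted _ _ _ _).mp hy))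
    · have := PySem.List.sorted_pairwise (q.erase m) (fun x : Int => x)
      simpa using this

theorem heapLoopFuel_eq_wsum (n : Nat) : ∀ (q : List Int), q.length ≤ n → ∀ (total index : Int),
    heapLoopFuel n q total index = wsum (PySem.List.sorted q (fun x => x) false) total index := by
  induction n with
  | zero =>
      intro q hq total index
      have : q = [] := List.eq_nil_of_length_eq_zero (Nat.le_zero.mp hq)
      subst this
      simp [heapLoopFuel, PySem.List.sorted, wsum]
  | succ n ih =>
      intro q hq total index
      cases hmin : PySem.List.min? q (fun x : Int => x) with
      | none =>
          have : q = [] := (PySem.List.min?_eq_none_iff _ _).mp hmin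
          subst this
          simp [heapLoopFuel, pyHeapPop?, PySem.List.sorted, wsum, hmin]
      | some m =>
          have hmem : m ∈ q := PySem.List.min?_mem hmin
          have hm : ∀ y ∈ q, m ≤ y := by
            intro y hy; exact PySem.List.min?_isMin hmin y hy
          have hrm : PySem.List.remove? q m = some (q.erase m) :=
            PySem.List.remove?_eq_some_erase q m hmem
          have hlen : (q.erase m).length ≤ n := by
            have := q.length_erase_of_mem hmem
            omega
          rw [sorted_cons_erase q m hmem hm]
          simp only [heapLoopFuel, pyHeapPop?, hmin, hrm, Option.getD_some, wsum]
          exact ih (q.erase m) hlen _ _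

-- B's enumerated foldl over t equals wsum over the negations of t
theorem foldl_enumerate_eq_wsum (t : List Int) : ∀ (total index : Int),
    (PySem.List.enumerate t index).foldl
      (fun acc p => acc + (1 + PySem.Int.floordiv p.1 8) * p.2) total
    = wsum (t.map (fun f => -f)) total index := by
  induction t with
  | nil => intro total index; simp [PySem.List.enumerate_nil, wsum]
  | cons f rest ih =>
      intro total index
      rw [PySem.List.enumerate_cons]
      simp only [List.foldl_cons, List.map_cons, wsum, neg_neg]
      exact ih _ _

-- descending sort commutes with negation into ascending sort
theorem sorted_map_neg (l : List Int) :
    PySem.List.sorted (l.map (fun f => -f)) (fun x => x) false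
    = (PySem.List.sorted l (fun x => x) true).map (fun f => -f) := by
  apply PySem.List.sorted_id_eq_of_perm_of_pairwise
  · exact (PySem.List.sorted_perm l (fun x : Int => x) true).map _
  · rw [List.pairwise_map]
    have := PySem.List.sorted_pairwise_rev l (fun x : Int => x)
    exact this.imp (fun h => by simpa using neg_le_neg h)

-- ===== VERDICT (by name: the statement is the Claim_ definition above) =====
theorem minimum_pushes_heap_spec : Claim_equal_minimum_pushes_heap := by
  intro word _
  unfold Spec_minimum_pushes_heap minimum_pushes_heap minimum_pushes_heap_alt
  rw [heapLoopFuel_eq_wsum _ _ le_rfl, foldl_enumerate_eq_wsum, sorted_map_neg]
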